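-- pv_equiv track=rewrite | github.com/pjrowe/build_blocks | python tricks.py | majority_element_indexes
-- ===== SOURCE A (Python) =====
-- def majority_element_indexes(lst):
--     """
--     Return a list of the indexes of the majority element.
--     Majority element is the element that appears more than
--     floor(n / 2) times.
--
--     at powershell prompt in working directory:
--     python -m doctest interview.py
--
--     Verbose option:
--     python -m doctest -v interview.py
--
--     If there is no majority element, return []
--     >>> majority_element_indexes([1, 1, 2])
--     [0, 1]
--     >>> majority_element_indexes([1, 2])
--     []
--     >>> majority_element_indexes([])
--     []
--     """
--     n = len(lst)
--     s_lst = lst[:]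
--     s_lst.sort()
--
--     def find_ind(lst, el):
--         indices = []
--         for i, value in enumerate(lst):
--             if value == el:
--                 indices.append(i)
--         return indices
--
--     # if even e.g., 10, len middle index is 4 and 5
--     # and lst[5]==lst[0] or lst[4] == lst[9]
--
--     # if odd # items, then middle index e.g., n=11, then lst[5] should
--     # be same as lst[10] or lst[0]
--     # no need to be so verbose; if we use counter, we do not need all
--     # the elifs
--
--     if n == 1:
--         return [0]
--     elif n == 2 and lst[0] == lst[1]:
--         return [0, 1]
--     elif (n != 2) and (n % 2 == 0) and ((s_lst[n // 2] == s_lst[-1])):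
--         major_el = s_lst[-1]
--         return find_ind(lst, major_el)
--     elif (n != 2) and (n % 2 == 0) and (s_lst[n // 2 + 1] == s_lst[0]):
--         major_el = s_lst[0]
--         return find_ind(lst, major_el)
--     elif (n != 2) and (n % 2 == 1) and (s_lst[(n - 1) // 2] == s_lst[-1]):
--         major_el = s_lst[-1]
--         return find_ind(lst, major_el)
--     elif (n != 2) and (n % 2 == 1) and (s_lst[(n - 1) // 2] == s_lst[0]):
--         major_el = s_lst[0]
--         return find_ind(lst, major_el)
--     else:
--         return []
-- ===== SOURCE B (Python) =====
-- def majority_element_indexes(lst):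
--     """Boyer-Moore majority vote, then one verification pass, then collect indices."""
--     cand = None
--     cnt = 0
--     for x in lst:
--         if cnt == 0:
--             cand = x
--             cnt = 1
--         elif x == cand:
--             cnt += 1
--         else:
--             cnt -= 1
--     if cand is not None and 2 * lst.count(cand) > len(lst):
--         return [i for i, x in enumerate(lst) if x == cand]
--     return []
-- ===== Notes on version B (the rewrite author's own statement) =====
-- stated objective: alternative
-- what changed: A copies and sorts the list and decides majority by comparing a few positions of the sorted copy (getting several even-length and middle-valued cases wrong); B runs the Boyer-Moore majority vote in one pass, verifies the candidate's count, and collects the indices.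
-- intended difference: On lists of length >= 3 where either the majority element is strictly between the list's min and max, or the maximum occurs exactly n/2 times, or the minimum is a majority occurring exactly n/2+1 times, A returns the wrong value ([] for a real majority, or the indices of a non-majority maximum); B returns the indices of the true majority element (or [] when there is none), which is what the docstring specifies. — e.g. on majority_element_indexes([0, 1, 1, 1, 2]): A returns [], B returns [1, 2, 3]
-- outside the precondition, e.g. on majority_element_indexes([]): A raises IndexError, B returns []
import Mathlib
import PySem

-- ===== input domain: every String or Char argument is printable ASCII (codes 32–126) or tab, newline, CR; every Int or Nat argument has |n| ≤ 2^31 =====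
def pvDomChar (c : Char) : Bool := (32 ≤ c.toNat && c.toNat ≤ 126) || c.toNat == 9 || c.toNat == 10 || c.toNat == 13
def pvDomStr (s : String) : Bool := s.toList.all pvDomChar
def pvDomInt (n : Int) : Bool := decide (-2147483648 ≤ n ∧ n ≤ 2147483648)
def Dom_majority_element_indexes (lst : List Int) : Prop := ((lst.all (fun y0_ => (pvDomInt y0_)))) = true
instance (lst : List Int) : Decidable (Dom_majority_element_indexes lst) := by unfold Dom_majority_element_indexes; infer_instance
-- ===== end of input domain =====

-- B replaces A's sort-and-probe test by the Boyer-Moore majority vote + a verification pass;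
-- A's return value is wrong on the inputs described by D_ below, where B returns the intended majority indices.

-- ===== PORT A =====
-- A's inner helper find_ind: enumerate + append
def find_ind_go : List Int → Int → Int → List Int
  | [], _, _ => []
  | x :: xs, el, i => if x = el then i :: find_ind_go xs el (i + 1) else find_ind_go xs el (i + 1)

def find_ind (lst : List Int) (el : Int) : List Int := find_ind_go lst el 0

-- s[i] for A's subscripts: exact wherever A does not raise (inside Pre_ every access A performs is in range)
def sget (s : List Int) (i : Int) : Int := PySem.List.pyGetD s i 0

def majority_element_indexes (lst : List Int) : List Int :=
  let n : Int := lst.length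
  let s_lst := PySem.List.sorted lst (fun x => x) false
  if n = 1 then [0]
  else if n = 2 ∧ sget lst 0 = sget lst 1 then [0, 1]
  else if n ≠ 2 ∧ PySem.Int.mod n 2 = 0 ∧ sget s_lst (PySem.Int.floordiv n 2) = sget s_lst (-1) then
    find_ind lst (sget s_lst (-1))
  else if n ≠ 2 ∧ PySem.Int.mod n 2 = 0 ∧ sget s_lst (PySem.Int.floordiv n 2 + 1) = sget s_lst 0 then
    find_ind lst (sget s_lst 0)
  else if n ≠ 2 ∧ PySem.Int.mod n 2 = 1 ∧ sget s_lst (PySem.Int.floordiv (n - 1) 2) = sget s_lst (-1) then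
    find_ind lst (sget s_lst (-1))
  else if n ≠ 2 ∧ PySem.Int.mod n 2 = 1 ∧ sget s_lst (PySem.Int.floordiv (n - 1) 2) = sget s_lst 0 then
    find_ind lst (sget s_lst 0)
  else []

-- ===== PORT B =====
-- Boyer-Moore vote over the list, state (cand, cnt)
def bm_scan : List Int → Option Int → Int → Option Int × Int
  | [], cand, cnt => (cand, cnt)
  | x :: xs, cand, cnt =>
    if cnt = 0 then bm_scan xs (some x) 1
    else if some x = cand then bm_scan xs cand (cnt + 1)
    else bm_scan xs cand (cnt - 1)

-- B's comprehension [i for i, x in enumerate(lst) if x == cand]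
def collect_idx (lst : List Int) (el : Int) : List Int :=
  (PySem.List.enumerate lst 0).filterMap (fun p => if p.2 = el then some p.1 else none)

def majority_element_indexes_alt (lst : List Int) : List Int :=
  match bm_scan lst none 0 with
  | (none, _) => []
  | (some c, _) =>
      if (lst.length : Int) < 2 * (lst.count c : Int) then collect_idx lst c else []

-- ===== PRECONDITION & SPEC =====
-- Pre_ excludes only the empty list, on which A raises IndexError (s_lst[0] on an empty sorted copy).
def Pre_majority_element_indexes (lst : List Int) : Prop := lst ≠ []
instance (lst : List Int) : Decidable (Pre_majority_element_indexes lst) := by unfold Pre_majority_element_indexes; infer_instance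

def pvWitness_majority_element_indexes : List Int := [1, 1, 2]

-- On lists of length ≥ 3 where the majority element lies strictly between the list's min and max,
-- or (even n) the maximum occurs exactly n/2 times, or (even n) the minimum is a majority occurring
-- exactly n/2+1 times, A returns the wrong value ([] for a real majority, or the indices of a
-- non-majority maximum); B returns the indices of the true majority element (or [] when there is
-- none), which is what A's docstring specifies.
def D_majority_element_indexes (lst : List Int) : Prop :=
  3 ≤ lst.length ∧ ∃ v ∈ lst,
    (lst.length < 2 * lst.count v ∧ (∃ a ∈ lst, a < v) ∧ (∃ b ∈ lst, v < b)) ∨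
    (2 * lst.count v = lst.length ∧ ∀ a ∈ lst, a ≤ v) ∨
    (2 * lst.count v = lst.length + 2 ∧ ∀ a ∈ lst, v ≤ a)
instance (lst : List Int) : Decidable (D_majority_element_indexes lst) := by unfold D_majority_element_indexes; infer_instance

def Spec_majority_element_indexes (lst : List Int) (out : List Int) : Prop :=
  ¬ D_majority_element_indexes lst → out = majority_element_indexes_alt lst
instance (lst : List Int) (out : List Int) : Decidable (Spec_majority_element_indexes lst out) := by unfold Spec_majority_element_indexes; infer_instance

def pvDiffWitness_majority_element_indexes : List Int := [0, 1, 1, 1, 2]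
def pvDiffWitnessOut_majority_element_indexes : (List Int) × (List Int) := ([], [1, 2, 3])

-- ===== CLAIM (what is proved, stated in full; the proofs are below) =====
def Claim_unchanged_majority_element_indexes : Prop := ∀ (lst : List Int), Dom_majority_element_indexes lst → Pre_majority_element_indexes lst → Spec_majority_element_indexes lst (majority_element_indexes lst)
def Claim_changed_majority_element_indexes : Prop := Dom_majority_element_indexes (pvDiffWitness_majority_element_indexes) ∧ Pre_majority_element_indexes (pvDiffWitness_majority_element_indexes) ∧ D_majority_element_indexes (pvDiffWitness_majority_element_indexes) ∧ majority_element_indexes (pvDiffWitness_majority_element_indexes) = pvDiffWitnessOut_majority_element_indexes.1 ∧ majority_element_indexes_alt (pvDiffWitness_majority_element_indexes) = pvDiffWitnessOut_majority_element_indexes.2 ∧ pvDiffWitnessOut_majority_element_indexes.1 ≠ pvDiffWitnessOut_majority_element_indexes.2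

def Claim_exact_majority_element_indexes : Prop := ∀ (lst : List Int), Dom_majority_element_indexes lst → Pre_majority_element_indexes lst → D_majority_element_indexes lst → majority_element_indexes lst ≠ majority_element_indexes_alt lst


-- ===== LEMMAS AND PROOFS =====

-- A's find_ind and B's comprehension produce the same index list.
theorem find_ind_go_eq (lst : List Int) (el : Int) (i : Int) :
    find_ind_go lst el i
      = (PySem.List.enumerate lst i).filterMap (fun p => if p.2 = el then some p.1 else none) := by
  induction lst generalizing i with
  | nil => simp [find_ind_go, PySem.List.enumerate_nil]
  | cons x xs ih =>
      by_cases h : x = el <;>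
        simp [find_ind_go, PySem.List.enumerate_cons, h, ih]

theorem find_ind_eq_collect (lst : List Int) (el : Int) :
    find_ind lst el = collect_idx lst el := find_ind_go_eq lst el 0

-- Boyer-Moore invariant: the vote count bounds every element's count.
theorem bm_inv (xs : List Int) (c : Option Int) (k : Int) (hk : 0 ≤ k) :
    0 ≤ (bm_scan xs c k).2 ∧
    ∀ v : Int, 2 * (xs.count v : Int) + (if c = some v then k else -k)
      ≤ (xs.length : Int) + (if (bm_scan xs c k).1 = some v then (bm_scan xs c k).2
                             else -(bm_scan xs c k).2) := by
  induction xs generalizing c k with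
  | nil =>
      refine ⟨by simpa [bm_scan] using hk, fun v => ?_⟩
      simp [bm_scan]
  | cons x xs ih =>
      simp only [bm_scan]
      split_ifs with h0 hx
      · subst h0
        obtain ⟨hge, hiv⟩ := ih (some x) 1 (by norm_num)
        refine ⟨hge, fun v => ?_⟩
        have h2 := hiv v
        have hcc : ((x :: xs).count v : Int) = (xs.count v : Int) + (if some x = some v then 1 else 0) := by
          rcases eq_or_ne v x with rfl | hv
          · simp
          · simp [Ne.symm hv]
        rw [hcc, List.length_cons]
        push_cast
        split_ifs at h2 ⊢ <;> omega
      · subst hx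
        obtain ⟨hge, hiv⟩ := ih (some x) (k + 1) (by omega)
        refine ⟨hge, fun v => ?_⟩
        have h2 := hiv v
        have hcc : ((x :: xs).count v : Int) = (xs.count v : Int) + (if some x = some v then 1 else 0) := by
          rcases eq_or_ne v x with rfl | hv
          · simp
          · simp [Ne.symm hv]
        rw [hcc, List.length_cons]
        push_cast
        split_ifs at h2 ⊢ <;> omega
      · obtain ⟨hge, hiv⟩ := ih c (k - 1) (by omega)
        refine ⟨hge, fun v => ?_⟩
        have h2 := hiv v
        have hcc : ((x :: xs).count v : Int) = (xs.count v : Int) + (if some x = some v then 1 else 0) := by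
          rcases eq_or_ne v x with rfl | hv
          · simp
          · simp [Ne.symm hv]
        rw [hcc, List.length_cons]
        push_cast
        split_ifs at h2 ⊢ <;> first
          | omega
          | (rename_i hv hc hr; exact absurd (hv.trans hc.symm) hx)

-- if v is a strict majority, the vote's final candidate is v
theorem bm_maj (lst : List Int) (v : Int) (h : (lst.length : Int) < 2 * (lst.count v : Int)) :
    (bm_scan lst none 0).1 = some v := by
  obtain ⟨hge, hiv⟩ := bm_inv lst none 0 le_rfl
  have h2 := hiv v
  by_contra hne
  simp only [hne, if_false] at h2
  simp only [show ((none : Option Int) = some v) = False by simp, if_false] at h2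
  omega

theorem alt_of_maj (lst : List Int) (v : Int) (h : (lst.length : Int) < 2 * (lst.count v : Int)) :
    majority_element_indexes_alt lst = collect_idx lst v := by
  have hc := bm_maj lst v h
  unfold majority_element_indexes_alt
  rcases hbm : bm_scan lst none 0 with ⟨c, k⟩
  rw [hbm] at hc
  simp only at hc
  subst hc
  simp [h]

theorem alt_of_no_maj (lst : List Int) (h : ∀ v : Int, ¬ ((lst.length : Int) < 2 * (lst.count v : Int))) :
    majority_element_indexes_alt lst = [] := by
  unfold majority_element_indexes_alt
  rcases hbm : bm_scan lst none 0 with ⟨c, k⟩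
  cases c with
  | none => simp
  | some c => simp [h c]

-- ----- sorted-list counting lemmas (about any ≤-pairwise list) -----

theorem pw_mono (s : List Int) (hp : s.Pairwise (· ≤ ·)) (p q : Nat) (hpq : p ≤ q)
    (hq : q < s.length) : s[p]'(by omega) ≤ s[q] := by
  rcases eq_or_lt_of_le hpq with rfl | h
  · exact le_rfl
  · exact List.pairwise_iff_getElem.mp hp p q (by omega) hq h

-- an equal run from i to j gives count ≥ j - i + 1
theorem run_count (s : List Int) (hp : s.Pairwise (· ≤ ·)) (i j : Nat) (hij : i ≤ j)
    (hj : j < s.length) (heq : s[i]'(by omega) = s[j]) :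
    j - i + 1 ≤ s.count (s[j]) := by
  have hsub : ((s.drop i).take (j - i + 1)).Sublist s :=
    ((s.drop i).take_sublist _).trans (s.drop_sublist i)
  have hlen : ((s.drop i).take (j - i + 1)).length = j - i + 1 := by
    simp; omega
  have hall : ∀ b ∈ (s.drop i).take (j - i + 1), s[j] = b := by
    intro b hb
    obtain ⟨k, hk, hkb⟩ := List.mem_iff_getElem.mp hb
    rw [hlen] at hk
    rw [List.getElem_take, List.getElem_drop] at hkb
    have h1 : s[i]'(by omega) ≤ s[i + k]'(by omega) := pw_mono s hp i (i + k) (by omega) (by omega)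
    have h2 : s[i + k]'(by omega) ≤ s[j] := pw_mono s hp (i + k) j (by omega) hj
    rw [← hkb]
    omega
  calc j - i + 1 = ((s.drop i).take (j - i + 1)).count (s[j]) := by
        rw [List.count_eq_length.mpr hall, hlen]
    _ ≤ s.count (s[j]) := hsub.count_le _

-- if v is the maximum and occurs at least (length - i) times then position i already holds v
theorem eq_max_of_count (s : List Int) (hp : s.Pairwise (· ≤ ·)) (v : Int)
    (hmax : ∀ a ∈ s, a ≤ v) (i : Nat) (hi : i < s.length)
    (hc : s.length - i ≤ s.count v) : s[i] = v := by
  by_contra hne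
  have hlt : s[i] < v := lt_of_le_of_ne (hmax _ (List.getElem_mem hi)) hne
  have htake : (s.take (i + 1)).count v = 0 := by
    rw [List.count_eq_zero]
    intro hv
    obtain ⟨k, hk, hkv⟩ := List.mem_iff_getElem.mp hv
    have hk' : k < i + 1 := by simp at hk; omega
    rw [List.getElem_take] at hkv
    have := pw_mono s hp k i (by omega) hi
    omega
  have hsplit : s.count v = (s.take (i + 1)).count v + (s.drop (i + 1)).count v := by
    conv_lhs => rw [← List.take_append_drop (i + 1) s]
    rw [List.count_append]
  have hdrop : (s.drop (i + 1)).count v ≤ s.length - (i + 1) := by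
    have := List.count_le_length (a := v) (l := s.drop (i + 1))
    simpa using this
  omega

-- dual: v the minimum with count ≥ i + 1
theorem eq_min_of_count (s : List Int) (hp : s.Pairwise (· ≤ ·)) (v : Int)
    (hmin : ∀ a ∈ s, v ≤ a) (i : Nat) (hi : i < s.length)
    (hc : i + 1 ≤ s.count v) : s[i] = v := by
  by_contra hne
  have hlt : v < s[i] := lt_of_le_of_ne (hmin _ (List.getElem_mem hi)) (fun h => hne h.symm)
  have hdrop : (s.drop i).count v = 0 := by
    rw [List.count_eq_zero]
    intro hv
    obtain ⟨k, hk, hkv⟩ := List.mem_iff_getElem.mp hv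
    rw [List.getElem_drop] at hkv
    have := pw_mono s hp i (i + k) (by omega) (by simp at hk; omega)
    omega
  have hsplit : s.count v = (s.take i).count v + (s.drop i).count v := by
    conv_lhs => rw [← List.take_append_drop i s]
    rw [List.count_append]
  have htake : (s.take i).count v ≤ i := by
    have h1 := List.count_le_length (a := v) (l := s.take i)
    have h2 : (s.take i).length ≤ i := by simp
    omega
  omega

-- ----- sget / cast bridges -----

theorem sget_natCast (s : List Int) (k : Nat) (h : k < s.length) : sget s (k : Int) = s[k] := by
  simp [sget, PySem.List.pyGetD_natCast, List.getD_eq_getElem?_getD, h]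

theorem sget_zero (s : List Int) (h : 0 < s.length) : sget s 0 = s[0] := by
  simp [sget, PySem.List.pyGetD_zero, List.getD_eq_getElem?_getD, h]

theorem sget_neg_one (s : List Int) (h : s ≠ []) :
    sget s (-1) = s[s.length - 1]'(by cases s <;> simp_all) := by
  unfold sget
  rw [PySem.List.pyGetD_neg_one (h := h)]
  exact List.getLast_eq_getElem h

theorem fd2 (n : Nat) : PySem.Int.floordiv (n : Int) 2 = ((n / 2 : Nat) : Int) := by
  simp

theorem md2 (n : Nat) : PySem.Int.mod (n : Int) 2 = ((n % 2 : Nat) : Int) := by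
  simp

-- ----- the main agreement theorem for length ≥ 3 -----

theorem main_ge3 (lst : List Int) (hn3 : 3 ≤ lst.length)
    (hD : ¬ D_majority_element_indexes lst) :
    majority_element_indexes lst = majority_element_indexes_alt lst := by
  have hD' : ¬ ∃ v ∈ lst,
      (lst.length < 2 * lst.count v ∧ (∃ a ∈ lst, a < v) ∧ (∃ b ∈ lst, v < b)) ∨
      (2 * lst.count v = lst.length ∧ ∀ a ∈ lst, a ≤ v) ∨
      (2 * lst.count v = lst.length + 2 ∧ ∀ a ∈ lst, v ≤ a) :=
    fun hc => hD ⟨hn3, hc⟩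
  set s := PySem.List.sorted lst (fun x => x) false with hs
  have hsl : s.length = lst.length := PySem.List.length_sorted lst (fun x => x) false
  have hperm : s.Perm lst := PySem.List.sorted_perm lst (fun x => x) false
  have hpair : s.Pairwise (· ≤ ·) := PySem.List.sorted_pairwise lst (fun x => x)
  have hne : s ≠ [] := by
    intro h; rw [h] at hsl; simp at hsl; omega
  have hmem : ∀ a : Int, a ∈ s ↔ a ∈ lst := fun a => hperm.mem_iff
  have hcnt : ∀ v : Int, s.count v = lst.count v := fun v => hperm.count_eq v
  have hmax : ∀ a ∈ s, a ≤ s[lst.length - 1]'(by omega) := by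
    intro a ha
    obtain ⟨k, hk, rfl⟩ := List.mem_iff_getElem.mp ha
    exact pw_mono s hpair k (lst.length - 1) (by omega) (by omega)
  have hmin : ∀ a ∈ s, s[0]'(by omega) ≤ a := by
    intro a ha
    obtain ⟨k, hk, rfl⟩ := List.mem_iff_getElem.mp ha
    exact pw_mono s hpair 0 k (by omega) (by omega)
  simp only [majority_element_indexes]
  rw [← hs]
  rw [if_neg (show ¬((lst.length : Int) = 1) by omega),
      if_neg (show ¬((lst.length : Int) = 2 ∧ sget lst 0 = sget lst 1) from
        fun hh => by have := hh.1; omega)]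
  rw [md2, fd2, sget_neg_one s hne, sget_zero s (by omega),
      show ((lst.length : Int) - 1) = ((lst.length - 1 : Nat) : Int) by omega, fd2,
      show (((lst.length / 2 : Nat) : Int) + 1) = ((lst.length / 2 + 1 : Nat) : Int) by push_cast; ring,
      sget_natCast s (lst.length / 2) (by omega),
      sget_natCast s (lst.length / 2 + 1) (by omega),
      sget_natCast s ((lst.length - 1) / 2) (by omega)]
  simp only [hsl]
  split_ifs with hc1 hc2 hc3 hc4
  · -- even, sorted[n/2] == sorted[-1]: the maximum; ¬D rules out count = n/2 exactly
    obtain ⟨-, he, heq⟩ := hc1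
    have heven : lst.length % 2 = 0 := by omega
    have hrc := run_count s hpair (lst.length / 2) (lst.length - 1) (by omega) (by omega) heq
    rw [hcnt] at hrc
    have hm : s[lst.length - 1]'(by omega) ∈ lst := (hmem _).mp (List.getElem_mem _)
    have hmaxl : ∀ a ∈ lst, a ≤ s[lst.length - 1]'(by omega) :=
      fun a ha => hmax a ((hmem a).mpr ha)
    have hne2 : 2 * lst.count (s[lst.length - 1]'(by omega)) ≠ lst.length :=
      fun hq => hD' ⟨_, hm, Or.inr (Or.inl ⟨hq, hmaxl⟩)⟩
    have hmaj : (lst.length : Int) < 2 * (lst.count (s[lst.length - 1]'(by omega)) : Int) := by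
      omega
    rw [alt_of_maj lst _ hmaj]
    exact find_ind_eq_collect lst _
  · -- even, sorted[n/2+1] == sorted[0]: the minimum occurs ≥ n/2 + 2 times
    have heq := hc2.2.2
    have hrc := run_count s hpair 0 (lst.length / 2 + 1) (by omega) (by omega) heq.symm
    rw [heq, hcnt] at hrc
    have hmaj : (lst.length : Int) < 2 * (lst.count (s[0]'(by omega)) : Int) := by
      omega
    rw [alt_of_maj lst _ hmaj]
    exact find_ind_eq_collect lst _
  · -- odd, sorted[(n-1)/2] == sorted[-1]
    obtain ⟨-, he, heq⟩ := hc3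
    have hodd : lst.length % 2 = 1 := by omega
    have hrc := run_count s hpair ((lst.length - 1) / 2) (lst.length - 1) (by omega) (by omega) heq
    rw [hcnt] at hrc
    have hmaj : (lst.length : Int) < 2 * (lst.count (s[lst.length - 1]'(by omega)) : Int) := by
      omega
    rw [alt_of_maj lst _ hmaj]
    exact find_ind_eq_collect lst _
  · -- odd, sorted[(n-1)/2] == sorted[0]
    obtain ⟨-, he, heq⟩ := hc4
    have hodd : lst.length % 2 = 1 := by omega
    have hrc := run_count s hpair 0 ((lst.length - 1) / 2) (by omega) (by omega) heq.symm
    rw [heq, hcnt] at hrc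
    have hmaj : (lst.length : Int) < 2 * (lst.count (s[0]'(by omega)) : Int) := by
      omega
    rw [alt_of_maj lst _ hmaj]
    exact find_ind_eq_collect lst _
  · -- no branch fired: there is no majority element at all
    have hnomaj : ∀ v : Int, ¬ ((lst.length : Int) < 2 * (lst.count v : Int)) := by
      intro v hv
      have hvmaj : lst.length < 2 * lst.count v := by exact_mod_cast hv
      have hvmem : v ∈ lst := by
        by_contra hm
        rw [List.count_eq_zero.mpr hm] at hvmaj
        omega
      have hvs : v ∈ s := (hmem v).mpr hvmem
      have hminmax : (∀ a ∈ lst, a ≤ v) ∨ (∀ a ∈ lst, v ≤ a) := by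
        by_contra hmm
        push Not at hmm
        obtain ⟨⟨b, hb, hbv⟩, a, ha, hav⟩ := hmm
        exact hD' ⟨v, hvmem, Or.inl ⟨hvmaj, ⟨a, ha, hav⟩, ⟨b, hb, hbv⟩⟩⟩
      have hmaxs : ∀ a ∈ s, a ≤ s[lst.length - 1]'(by omega) := hmax
      rcases hminmax with hvmax | hvmin
      · -- v is the maximum of the list
        have hveq : s[lst.length - 1]'(by omega) = v := by
          have h1 : s[lst.length - 1]'(by omega) ≤ v :=
            hvmax _ ((hmem _).mp (List.getElem_mem (by omega)))
          have h2 := hmax v hvs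
          omega
        have hvmaxs : ∀ a ∈ s, a ≤ v := fun a ha => hvmax a ((hmem a).mp ha)
        rcases Nat.even_or_odd lst.length with hpar | hpar
        · have heven : lst.length % 2 = 0 := Nat.even_iff.mp hpar
          have hmid : s[lst.length / 2]'(by omega) = v :=
            eq_max_of_count s hpair v hvmaxs (lst.length / 2) (by omega)
              (by rw [hsl, hcnt]; omega)
          exact hc1 ⟨by omega, by simp [heven], hmid.trans hveq.symm⟩
        · have hodd : lst.length % 2 = 1 := Nat.odd_iff.mp hpar
          have hmid : s[(lst.length - 1) / 2]'(by omega) = v :=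
            eq_max_of_count s hpair v hvmaxs ((lst.length - 1) / 2) (by omega)
              (by rw [hsl, hcnt]; omega)
          exact hc3 ⟨by omega, by simp [hodd], hmid.trans hveq.symm⟩
      · -- v is the minimum of the list
        have hveq : s[0]'(by omega) = v := by
          have h1 : v ≤ s[0]'(by omega) :=
            hvmin _ ((hmem _).mp (List.getElem_mem (by omega)))
          have h2 := hmin v hvs
          omega
        have hvmins : ∀ a ∈ s, v ≤ a := fun a ha => hvmin a ((hmem a).mp ha)
        rcases Nat.even_or_odd lst.length with hpar | hpar
        · have heven : lst.length % 2 = 0 := Nat.even_iff.mp hpar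
          have hne2 : 2 * lst.count v ≠ lst.length + 2 :=
            fun hq => hD' ⟨v, hvmem, Or.inr (Or.inr ⟨hq, hvmin⟩)⟩
          have hmid : s[lst.length / 2 + 1]'(by omega) = v :=
            eq_min_of_count s hpair v hvmins (lst.length / 2 + 1) (by omega)
              (by rw [hcnt]; omega)
          exact hc2 ⟨by omega, by simp [heven], hmid.trans hveq.symm⟩
        · have hodd : lst.length % 2 = 1 := Nat.odd_iff.mp hpar
          have hmid : s[(lst.length - 1) / 2]'(by omega) = v :=
            eq_min_of_count s hpair v hvmins ((lst.length - 1) / 2) (by omega)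
              (by rw [hcnt]; omega)
          exact hc4 ⟨by omega, by simp [hodd], hmid.trans hveq.symm⟩
    rw [alt_of_no_maj lst hnomaj]

theorem main_equiv (lst : List Int) (hpre : lst ≠ []) (hD : ¬ D_majority_element_indexes lst) :
    majority_element_indexes lst = majority_element_indexes_alt lst := by
  match lst with
  | [] => exact absurd rfl hpre
  | [x] =>
      have hA : majority_element_indexes [x] = [0] := by
        unfold majority_element_indexes; norm_num
      have hB : majority_element_indexes_alt [x] = [0] := by
        unfold majority_element_indexes_alt
        norm_num [bm_scan, collect_idx, PySem.List.enumerate_cons, PySem.List.enumerate_nil,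
          List.count_cons, List.filterMap_cons, List.filterMap_nil]
      rw [hA, hB]
  | [x, y] =>
      by_cases h : x = y
      · subst h
        have hA : majority_element_indexes [x, x] = [0, 1] := by
          unfold majority_element_indexes
          norm_num [show sget [x, x] 0 = x from rfl, show sget [x, x] 1 = x from rfl]
        have hB : majority_element_indexes_alt [x, x] = [0, 1] := by
          unfold majority_element_indexes_alt
          norm_num [bm_scan, collect_idx, PySem.List.enumerate_cons, PySem.List.enumerate_nil,
            List.count_cons, List.filterMap_cons, List.filterMap_nil]
        rw [hA, hB]
      · have hA : majority_element_indexes [x, y] = [] := by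
          unfold majority_element_indexes
          norm_num [show sget [x, y] 0 = x from rfl, show sget [x, y] 1 = y from rfl, h]
        have hB : majority_element_indexes_alt [x, y] = [] := by
          unfold majority_element_indexes_alt
          norm_num [bm_scan, collect_idx, Ne.symm h, List.count_cons, h]
        rw [hA, hB]
  | x :: y :: z :: t =>
      exact main_ge3 _ (by simp) hD


-- ----- tightness: A and B disagree everywhere inside D_ -----

theorem count_pair_le (x v : Int) (s : List Int) (h : x ≠ v) :
    s.count x + s.count v ≤ s.length := by
  induction s with
  | nil => simp
  | cons y ys ih =>
      have hx : (y :: ys).count x = ys.count x + (if y = x then 1 else 0) := by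
        simp [List.count_cons]
      have hv : (y :: ys).count v = ys.count v + (if y = v then 1 else 0) := by
        simp [List.count_cons]
      have hne : ¬ (y = x ∧ y = v) := fun hh => h (hh.1.symm.trans hh.2)
      simp only [List.length_cons]
      split_ifs at hx hv <;> simp_all <;> omega

theorem find_ind_go_ne_nil (lst : List Int) (v : Int) (hv : v ∈ lst) :
    ∀ i : Int, find_ind_go lst v i ≠ [] := by
  induction lst with
  | nil => cases hv
  | cons x xs ih =>
      intro i
      rcases eq_or_ne x v with rfl | hx
      · simp [find_ind_go]
      · have hv' : v ∈ xs := by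
          rcases List.mem_cons.mp hv with rfl | h
          · exact absurd rfl hx
          · exact h
        simpa [find_ind_go, hx] using ih hv' (i + 1)

theorem collect_idx_ne_nil (lst : List Int) (v : Int) (hv : v ∈ lst) :
    collect_idx lst v ≠ [] := by
  rw [← find_ind_eq_collect]
  exact find_ind_go_ne_nil lst v hv 0

theorem tight_main (lst : List Int) (hn3 : 3 ≤ lst.length)
    (hd : ∃ v ∈ lst,
      (lst.length < 2 * lst.count v ∧ (∃ a ∈ lst, a < v) ∧ (∃ b ∈ lst, v < b)) ∨
      (2 * lst.count v = lst.length ∧ ∀ a ∈ lst, a ≤ v) ∨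
      (2 * lst.count v = lst.length + 2 ∧ ∀ a ∈ lst, v ≤ a)) :
    majority_element_indexes lst ≠ majority_element_indexes_alt lst := by
  obtain ⟨v, hvmem, hcase⟩ := hd
  set s := PySem.List.sorted lst (fun x => x) false with hs
  have hsl : s.length = lst.length := PySem.List.length_sorted lst (fun x => x) false
  have hperm : s.Perm lst := PySem.List.sorted_perm lst (fun x => x) false
  have hpair : s.Pairwise (· ≤ ·) := PySem.List.sorted_pairwise lst (fun x => x)
  have hne : s ≠ [] := by
    intro h; rw [h] at hsl; simp at hsl; omega
  have hmem : ∀ a : Int, a ∈ s ↔ a ∈ lst := fun a => hperm.mem_iff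
  have hcnt : ∀ w : Int, s.count w = lst.count w := fun w => hperm.count_eq w
  have hmax : ∀ a ∈ s, a ≤ s[lst.length - 1]'(by omega) := by
    intro a ha
    obtain ⟨k, hk, rfl⟩ := List.mem_iff_getElem.mp ha
    exact pw_mono s hpair k (lst.length - 1) (by omega) (by omega)
  have hmin : ∀ a ∈ s, s[0]'(by omega) ≤ a := by
    intro a ha
    obtain ⟨k, hk, rfl⟩ := List.mem_iff_getElem.mp ha
    exact pw_mono s hpair 0 k (by omega) (by omega)
  have hvs : v ∈ s := (hmem v).mpr hvmem
  have hlast_mem : s[lst.length - 1]'(by omega) ∈ lst := (hmem _).mp (List.getElem_mem _)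
  have hhead_mem : s[0]'(by omega) ∈ lst := (hmem _).mp (List.getElem_mem _)
  have hpairc : ∀ x : Int, x ≠ v → lst.count x + lst.count v ≤ lst.length := by
    intro x hx
    exact count_pair_le x v lst hx
  simp only [majority_element_indexes]
  rw [← hs]
  rw [if_neg (show ¬((lst.length : Int) = 1) by omega),
      if_neg (show ¬((lst.length : Int) = 2 ∧ sget lst 0 = sget lst 1) from
        fun hh => by have := hh.1; omega)]
  rw [md2, fd2, sget_neg_one s hne, sget_zero s (by omega),
      show ((lst.length : Int) - 1) = ((lst.length - 1 : Nat) : Int) by omega, fd2,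
      show (((lst.length / 2 : Nat) : Int) + 1) = ((lst.length / 2 + 1 : Nat) : Int) by push_cast; ring,
      sget_natCast s (lst.length / 2) (by omega),
      sget_natCast s (lst.length / 2 + 1) (by omega),
      sget_natCast s ((lst.length - 1) / 2) (by omega)]
  simp only [hsl]
  split_ifs with hc1 hc2 hc3 hc4
  · -- branch 'even, max occupies the upper half' fired
    rcases hcase with hmid | hvmax | hvmin
    · -- middle majority: contradiction with hc1
      exfalso
      obtain ⟨hmaj, ⟨a, ha, hav⟩, b, hb, hvb⟩ := hmid
      have hrc := run_count s hpair (lst.length / 2) (lst.length - 1) (by omega) (by omega) hc1.2.2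
      rw [hcnt] at hrc
      have hneq : s[lst.length - 1]'(by omega) ≠ v := by
        have := hmax b ((hmem b).mpr hb); omega
      have := hpairc _ hneq
      omega
    · -- v is the maximum with count exactly n/2: A returns its indices, B returns []
      obtain ⟨hcv, hvmax⟩ := hvmax
      have hveq : s[lst.length - 1]'(by omega) = v := by
        have h1 := hvmax _ hlast_mem
        have h2 := hmax v hvs
        omega
      rw [alt_of_no_maj lst (by
        intro w hw
        have hw' : lst.length < 2 * lst.count w := by exact_mod_cast hw
        rcases eq_or_ne w v with rfl | hwv
        · omega
        · have := hpairc w hwv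
          omega)]
      rw [hveq]
      exact fun h => find_ind_go_ne_nil lst v hvmem 0 (by simpa [find_ind] using h)
    · -- v the minimum with count n/2 + 1: hc1 cannot have fired
      exfalso
      obtain ⟨hcv, hvmin⟩ := hvmin
      have hveq : s[0]'(by omega) = v := by
        have h1 := hvmin _ hhead_mem
        have h2 := hmin v hvs
        omega
      have hrc := run_count s hpair (lst.length / 2) (lst.length - 1) (by omega) (by omega) hc1.2.2
      rw [hcnt] at hrc
      rcases eq_or_ne (s[lst.length - 1]'(by omega)) v with hev | hneq
      · -- then every element equals v, so count v = n, impossible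
        have hall := run_count s hpair 0 (lst.length - 1) (by omega) (by omega)
          (by rw [hev, hveq])
        rw [hcnt, hev] at hall
        have := List.count_le_length (a := v) (l := lst)
        omega
      · have := hpairc _ hneq
        omega
  · -- branch 'even, min occupies past the middle' fired
    exfalso
    rcases hcase with hmid | hvmax | hvmin
    · obtain ⟨hmaj, ⟨a, ha, hav⟩, b, hb, hvb⟩ := hmid
      have hrc := run_count s hpair 0 (lst.length / 2 + 1) (by omega) (by omega) hc2.2.2.symm
      rw [hc2.2.2, hcnt] at hrc
      have hneq : s[0]'(by omega) ≠ v := by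
        have := hmin a ((hmem a).mpr ha); omega
      have := hpairc _ hneq
      omega
    · -- v the maximum with count n/2: branch 1 would have fired
      obtain ⟨hcv, hvmax⟩ := hvmax
      have hveq : s[lst.length - 1]'(by omega) = v := by
        have h1 := hvmax _ hlast_mem
        have h2 := hmax v hvs
        omega
      have hvmaxs : ∀ a ∈ s, a ≤ v := fun a ha => hvmax a ((hmem a).mp ha)
      have hmid : s[lst.length / 2]'(by omega) = v :=
        eq_max_of_count s hpair v hvmaxs (lst.length / 2) (by omega)
          (by rw [hsl, hcnt]; omega)
      exact hc1 ⟨by omega, by omega, hmid.trans hveq.symm⟩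
    · -- v the minimum with count n/2 + 1: sorted[n/2+1] is not v
      obtain ⟨hcv, hvmin⟩ := hvmin
      have hveq : s[0]'(by omega) = v := by
        have h1 := hvmin _ hhead_mem
        have h2 := hmin v hvs
        omega
      have hrc := run_count s hpair 0 (lst.length / 2 + 1) (by omega) (by omega) hc2.2.2.symm
      rw [hc2.2.2, hveq, hcnt] at hrc
      omega
  · -- branch 'odd max' fired
    exfalso
    rcases hcase with hmid | hvmax | hvmin
    · obtain ⟨hmaj, ⟨a, ha, hav⟩, b, hb, hvb⟩ := hmid
      have hrc := run_count s hpair ((lst.length - 1) / 2) (lst.length - 1) (by omega) (by omega) hc3.2.2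
      rw [hcnt] at hrc
      have hneq : s[lst.length - 1]'(by omega) ≠ v := by
        have := hmax b ((hmem b).mpr hb); omega
      have := hpairc _ hneq
      omega
    · -- 2 * count v = n forces n even, but this branch needs n odd
      obtain ⟨hcv, -⟩ := hvmax
      have := hc3.2.1
      omega
    · obtain ⟨hcv, -⟩ := hvmin
      have := hc3.2.1
      omega
  · -- branch 'odd min' fired
    exfalso
    rcases hcase with hmid | hvmax | hvmin
    · obtain ⟨hmaj, ⟨a, ha, hav⟩, b, hb, hvb⟩ := hmid
      have hrc := run_count s hpair 0 ((lst.length - 1) / 2) (by omega) (by omega) hc4.2.2.symm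
      rw [hc4.2.2, hcnt] at hrc
      have hneq : s[0]'(by omega) ≠ v := by
        have := hmin a ((hmem a).mpr ha); omega
      have := hpairc _ hneq
      omega
    · obtain ⟨hcv, -⟩ := hvmax
      have := hc4.2.1
      omega
    · obtain ⟨hcv, -⟩ := hvmin
      have := hc4.2.1
      omega
  · -- no branch fired: A returns [], but B does not (or branch 1 was forced)
    rcases hcase with hmid | hvmax | hvmin
    · obtain ⟨hmaj, -, -⟩ := hmid
      rw [alt_of_maj lst v (by omega)]
      exact fun h => collect_idx_ne_nil lst v hvmem h.symm
    · -- v the maximum with count n/2: branch 1 would have fired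
      exfalso
      obtain ⟨hcv, hvmax⟩ := hvmax
      have hveq : s[lst.length - 1]'(by omega) = v := by
        have h1 := hvmax _ hlast_mem
        have h2 := hmax v hvs
        omega
      have hvmaxs : ∀ a ∈ s, a ≤ v := fun a ha => hvmax a ((hmem a).mp ha)
      have hmid : s[lst.length / 2]'(by omega) = v :=
        eq_max_of_count s hpair v hvmaxs (lst.length / 2) (by omega)
          (by rw [hsl, hcnt]; omega)
      exact hc1 ⟨by omega, by omega, hmid.trans hveq.symm⟩
    · obtain ⟨hcv, -⟩ := hvmin
      rw [alt_of_maj lst v (by omega)]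
      exact fun h => collect_idx_ne_nil lst v hvmem h.symm

-- ===== VERDICT (by name: the statement is the Claim_ definition above) =====
theorem majority_element_indexes_spec : Claim_unchanged_majority_element_indexes := by
  intro lst _ hpre hD
  exact main_equiv lst hpre hD

theorem majority_element_indexes_changed : Claim_changed_majority_element_indexes := by
  unfold Claim_changed_majority_element_indexes; decide

theorem majority_element_indexes_tight : Claim_exact_majority_element_indexes := by
  intro lst _ hpre hd
  exact tight_main lst hd.1 hd.2
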